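-- pv_equiv track=rewrite | github.com/maedoc/tvb-wiki | scripts/repairer.py | _find_closest_page
-- ===== SOURCE A (Python) =====
-- def _find_closest_page(target: str, all_pages: dict, max_results: int = 3) -> list[str]:
--     """Find pages with similar slugs to a broken link target."""
--     candidates = []
--     target_lower = target.lower().replace('-', ' ')
--
--     for slug in all_pages:
--         slug_lower = slug.lower().replace('-', ' ')
--         # Exact prefix/suffix match
--         if slug_lower.startswith(target_lower[:5]) or slug_lower.endswith(target_lower[-5:]):
--             candidates.append((slug, 1))
--         # Substring match
--         elif target_lower in slug_lower or slug_lower in target_lower: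
--             candidates.append((slug, 2))
--         # Shared words
--         elif len(set(target_lower.split()) & set(slug_lower.split())) > 0:
--             candidates.append((slug, 3))
--
--     candidates.sort(key=lambda x: x[1])
--     return [c[0] for c in candidates[:max_results]]
-- ===== SOURCE B (Python) =====
-- def _find_closest_page(target: str, all_pages: dict, max_results: int = 3) -> list[str]:
--     """Priority-major search: scan the pages once per priority tier (1, then 2,
--     then 3), emitting slugs of exactly that tier in page order, and return as
--     soon as max_results slugs have been found; no candidate pairs, no sort."""
--     t = target.lower().replace('-', ' ')
--     head, tail, twords = t[:5], t[-5:], set(t.split())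
--
--     def priority(slug):
--         s = slug.lower().replace('-', ' ')
--         if s.startswith(head) or s.endswith(tail):
--             return 1
--         if t in s or s in t:
--             return 2
--         if twords & set(s.split()):
--             return 3
--         return None
--
--     results = []
--     for tier in (1, 2, 3):
--         for slug in all_pages:
--             if len(results) == max_results:
--                 return results
--             if priority(slug) == tier:
--                 results.append(slug)
--     return results
-- ===== Notes on version B (the rewrite author's own statement) =====
-- stated objective: alternative
-- what changed: B replaces A's page-major collect-(slug,priority)-pairs-then-stable-sort-then-slice pipeline with a priority-major search: one scan of the pages per tier (1, then 2, then 3) emitting slugs of exactly that tier, returning early the moment max_results slugs are found -- no pair list, no sort, no slice.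
-- outside the precondition, e.g. on _find_closest_page('a', {'ab': 'x', 'ac': 'y'}, -1): A returns ['ab'], B returns ['ab', 'ac']
import Mathlib
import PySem

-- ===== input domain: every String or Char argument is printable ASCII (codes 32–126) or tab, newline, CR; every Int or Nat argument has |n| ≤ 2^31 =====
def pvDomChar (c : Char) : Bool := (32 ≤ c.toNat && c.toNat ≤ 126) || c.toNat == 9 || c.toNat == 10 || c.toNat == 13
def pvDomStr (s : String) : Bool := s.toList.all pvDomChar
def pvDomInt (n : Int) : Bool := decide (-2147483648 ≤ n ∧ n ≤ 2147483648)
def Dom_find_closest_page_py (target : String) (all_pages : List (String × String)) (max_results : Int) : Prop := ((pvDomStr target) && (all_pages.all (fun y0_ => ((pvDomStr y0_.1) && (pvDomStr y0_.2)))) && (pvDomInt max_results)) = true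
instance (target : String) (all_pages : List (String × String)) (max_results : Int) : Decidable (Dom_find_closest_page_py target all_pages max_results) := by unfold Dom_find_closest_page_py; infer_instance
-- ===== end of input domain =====

-- B replaces A's page-major collect-(slug,priority)-pairs / stable-sort / slice pipeline with a
-- priority-major search: one scan of the pages per tier (1, then 2, then 3) emitting slugs of
-- exactly that tier, returning as soon as max_results slugs are found (objective: alternative).
-- In both ports 'for slug in all_pages' (a Python dict) iterates the DISTINCT keys in
-- first-occurrence order: PySem.List.dedup of the association list's keys.

-- ===== PORT A =====
def find_closest_page_py (target : String) (all_pages : List (String × String)) (max_results : Int) : List String :=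
  let target_lower := PySem.Str.replace (PySem.Str.lower target) "-" " "
  let candidates := (PySem.List.dedup (all_pages.map Prod.fst)).foldl
    (fun cand slug =>
      let slug_lower := PySem.Str.replace (PySem.Str.lower slug) "-" " "
      if PySem.Str.startswith slug_lower (PySem.Str.slice target_lower none (some 5))
          || PySem.Str.endswith slug_lower (PySem.Str.slice target_lower (some (-5)) none) then
        cand ++ [(slug, (1 : Int))]
      else if PySem.Str.isIn target_lower slug_lower || PySem.Str.isIn slug_lower target_lower then
        cand ++ [(slug, (2 : Int))]
      else if 0 < (PySem.Set.inter (PySem.Set.ofList (PySem.Str.split₀ target_lower))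
                    (PySem.Set.ofList (PySem.Str.split₀ slug_lower))).length then
        cand ++ [(slug, (3 : Int))]
      else cand) []
  (PySem.List.slice (PySem.List.sorted candidates (fun x => x.2) false) none (some max_results)).map Prod.fst

-- ===== PORT B =====
-- Source B's helper 'priority(slug)': the same cascade, returning 1/2/3 or None;
-- head/tail/twords are computed once by the caller
def pbPriorityOpt (t head tail : String) (twords : PySem.Set String) (slug : String) : Option Int :=
  let s := PySem.Str.replace (PySem.Str.lower slug) "-" " "
  if PySem.Str.startswith s head || PySem.Str.endswith s tail then some 1
  else if PySem.Str.isIn t s || PySem.Str.isIn s t then some 2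
  else if 0 < (PySem.Set.inter twords (PySem.Set.ofList (PySem.Str.split₀ s))).length then some 3
  else none

-- Source B's inner 'for slug in all_pages' loop for one tier; Python's early 'return results' exits
-- the whole function, which the outer fold reproduces because a full 'results' is returned
-- unchanged immediately by every later tier's scan.
def pbScanTier (t head tail : String) (twords : PySem.Set String) (max_results tier : Int) : List String → List String → List String
  | [], results => results
  | slug :: rest, results =>
    if (results.length : Int) = max_results then results
    else if pbPriorityOpt t head tail twords slug == some tier then
      pbScanTier t head tail twords max_results tier rest (results ++ [slug])
    else pbScanTier t head tail twords max_results tier rest results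

def find_closest_page_py_alt (target : String) (all_pages : List (String × String)) (max_results : Int) : List String :=
  let t := PySem.Str.replace (PySem.Str.lower target) "-" " "
  let head := PySem.Str.slice t none (some 5)
  let tail := PySem.Str.slice t (some (-5)) none
  let twords := PySem.Set.ofList (PySem.Str.split₀ t)
  ([1, 2, 3] : List Int).foldl
    (fun results tier =>
      pbScanTier t head tail twords max_results tier (PySem.List.dedup (all_pages.map Prod.fst)) results) []

-- ===== PRECONDITION & SPEC =====
-- Pre_ restricts to the natural domain of a result count: max_results ≥ 0. A still returns on
-- negative max_results (its Python slice then drops |max_results| results from the END, an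
-- artefact no caller relies on — the only call site uses the default 3), while B returns all
-- matching slugs there.
def Pre_find_closest_page_py (target : String) (all_pages : List (String × String)) (max_results : Int) : Prop := 0 ≤ max_results
instance (target : String) (all_pages : List (String × String)) (max_results : Int) : Decidable (Pre_find_closest_page_py target all_pages max_results) := by unfold Pre_find_closest_page_py; infer_instance

def pvWitness_find_closest_page_py : String × (List (String × String)) × Int :=
  ("broken-page", [("broken page", "a"), ("other", "b"), ("page two", "c")], 3)

def Spec_find_closest_page_py (target : String) (all_pages : List (String × String)) (max_results : Int) (out : List String) : Prop := out = find_closest_page_py_alt target all_pages max_results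
instance (target : String) (all_pages : List (String × String)) (max_results : Int) (out : List String) : Decidable (Spec_find_closest_page_py target all_pages max_results out) := by unfold Spec_find_closest_page_py; infer_instance

-- ===== CLAIM (what is proved, stated in full; the proofs are below) =====
def Claim_equal_find_closest_page_py : Prop := ∀ (target : String) (all_pages : List (String × String)) (max_results : Int), Dom_find_closest_page_py target all_pages max_results → Pre_find_closest_page_py target all_pages max_results → Spec_find_closest_page_py target all_pages max_results (find_closest_page_py target all_pages max_results)

-- ===== LEMMAS AND PROOFS =====

-- A's classification cascade as a total priority function (0 = no match), for the proof
def pbPriority (t : String) (slug : String) : Int :=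
  let s := PySem.Str.replace (PySem.Str.lower slug) "-" " "
  if PySem.Str.startswith s (PySem.Str.slice t none (some 5))
      || PySem.Str.endswith s (PySem.Str.slice t (some (-5)) none) then 1
  else if PySem.Str.isIn t s || PySem.Str.isIn s t then 2
  else if 0 < (PySem.Set.inter (PySem.Set.ofList (PySem.Str.split₀ t))
                (PySem.Set.ofList (PySem.Str.split₀ s))).length then 3
  else 0

lemma pbPriorityOpt_eq (t slug : String) (p : Int) (hp : p ≠ 0) :
    (pbPriorityOpt t (PySem.Str.slice t none (some 5)) (PySem.Str.slice t (some (-5)) none)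
        (PySem.Set.ofList (PySem.Str.split₀ t)) slug == some p) = (pbPriority t slug == p) := by
  unfold pbPriorityOpt pbPriority
  dsimp only
  split_ifs <;> simp [Ne.symm hp]

-- A's result on each slug is its priority: the candidate fold is a filterMap by pbPriority.
lemma foldA_eq_filterMap (t : String) (keys : List String) (acc : List (String × Int)) :
    keys.foldl
      (fun cand slug =>
        let slug_lower := PySem.Str.replace (PySem.Str.lower slug) "-" " "
        if PySem.Str.startswith slug_lower (PySem.Str.slice t none (some 5))
            || PySem.Str.endswith slug_lower (PySem.Str.slice t (some (-5)) none) then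
          cand ++ [(slug, (1 : Int))]
        else if PySem.Str.isIn t slug_lower || PySem.Str.isIn slug_lower t then
          cand ++ [(slug, (2 : Int))]
        else if 0 < (PySem.Set.inter (PySem.Set.ofList (PySem.Str.split₀ t))
                      (PySem.Set.ofList (PySem.Str.split₀ slug_lower))).length then
          cand ++ [(slug, (3 : Int))]
        else cand) acc
    = acc ++ keys.filterMap (fun slug =>
        let p := pbPriority t slug
        if p = 0 then none else some (slug, p)) := by
  induction keys generalizing acc with
  | nil => simp
  | cons s ks ih =>
    simp only [List.foldl_cons]
    rw [ih]
    simp only [List.filterMap_cons]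
    unfold pbPriority
    split_ifs <;> simp_all

lemma pbPriority_cases (t slug : String) :
    pbPriority t slug = 1 ∨ pbPriority t slug = 2 ∨
    pbPriority t slug = 3 ∨ pbPriority t slug = 0 := by
  unfold pbPriority; dsimp only; split_ifs <;> simp

lemma mem_filterMap_prio (prio : String → Int)
    (hpr : ∀ s, prio s = 1 ∨ prio s = 2 ∨ prio s = 3 ∨ prio s = 0) (keys : List String) :
    ∀ x ∈ keys.filterMap (fun s => if prio s = 0 then none else some (s, prio s)),
      x.2 = 1 ∨ x.2 = 2 ∨ x.2 = 3 := by
  intro x hx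
  rcases List.mem_filterMap.1 hx with ⟨s, -, hs⟩
  rcases hpr s with h | h | h | h <;> simp [h] at hs <;> simp [← hs]

-- the slug list of one priority bucket
lemma bucket_eq (prio : String → Int) (p : Int) (hp : p ≠ 0) (keys : List String) :
    ((keys.filterMap (fun s => if prio s = 0 then none else some (s, prio s))).filter
        (fun x => x.2 == p)).map Prod.fst
      = keys.filter (fun s => prio s == p) := by
  induction keys with
  | nil => simp
  | cons s ks ih =>
    by_cases h0 : prio s = 0
    · simp [h0, ih, Ne.symm hp]
    · by_cases hsp : prio s = p <;>
        simp [h0, hsp, hp, ih]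

lemma insertBy_split {α : Type} (before : α → α → Bool) (x : α) (ys zs : List α)
    (hy : ∀ y ∈ ys, before x y = false) (hz : ∀ z ∈ zs, before x z = true) :
    PySem.List.insertBy before x (ys ++ zs) = ys ++ x :: zs := by
  induction ys with
  | nil =>
    cases zs with
    | nil => simp [PySem.List.insertBy]
    | cons z zs => simp [PySem.List.insertBy, hz z (by simp)]
  | cons y ys ih =>
    have h1 : before x y = false := hy y (by simp)
    simp only [List.cons_append]
    simp [PySem.List.insertBy, h1, ih (fun a ha => hy a (by simp [ha]))]

-- stable sort of a 1/2/3-priority list = the three tiers concatenated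
lemma sorted_buckets (l : List (String × Int)) (h : ∀ x ∈ l, x.2 = 1 ∨ x.2 = 2 ∨ x.2 = 3) :
    PySem.List.sorted l (fun x => x.2) false
      = l.filter (fun x => x.2 == 1) ++ l.filter (fun x => x.2 == 2) ++ l.filter (fun x => x.2 == 3) := by
  rw [PySem.List.sorted_eq_foldl_insertBy]
  induction l using List.reverseRecOn with
  | nil => simp
  | append_singleton l' x ih =>
    rw [List.foldl_append, List.foldl_cons, List.foldl_nil,
      ih (fun y hy => h y (by simp [hy]))]
    have hmem : ∀ (q : Int) (y : String × Int), y ∈ l'.filter (fun x => x.2 == q) → y.2 = q := by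
      intro q y hy
      simpa using List.of_mem_filter hy
    rcases h x (by simp) with hx | hx | hx
    · rw [show l'.filter (fun x => x.2 == 1) ++ l'.filter (fun x => x.2 == 2) ++ l'.filter (fun x => x.2 == 3)
          = l'.filter (fun x => x.2 == 1) ++ (l'.filter (fun x => x.2 == 2) ++ l'.filter (fun x => x.2 == 3)) by
            simp [List.append_assoc]]
      rw [insertBy_split _ x _ _
        (by intro y hy; simp [hmem 1 y hy, hx])
        (by intro z hz; rcases List.mem_append.1 hz with hz | hz
            · simp [hmem 2 z hz, hx]
            · simp [hmem 3 z hz, hx])]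
      simp [List.filter_append, hx]
    · rw [show l'.filter (fun x => x.2 == 1) ++ l'.filter (fun x => x.2 == 2) ++ l'.filter (fun x => x.2 == 3)
          = (l'.filter (fun x => x.2 == 1) ++ l'.filter (fun x => x.2 == 2)) ++ l'.filter (fun x => x.2 == 3) by
            simp [List.append_assoc]]
      rw [insertBy_split _ x _ _
        (by intro y hy; rcases List.mem_append.1 hy with hy | hy
            · simp [hmem 1 y hy, hx]
            · simp [hmem 2 y hy, hx])
        (by intro z hz; simp [hmem 3 z hz, hx])]
      simp [List.filter_append, hx, List.append_assoc]
    · rw [show l'.filter (fun x => x.2 == 1) ++ l'.filter (fun x => x.2 == 2) ++ l'.filter (fun x => x.2 == 3)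
          = (l'.filter (fun x => x.2 == 1) ++ l'.filter (fun x => x.2 == 2) ++ l'.filter (fun x => x.2 == 3)) ++ ([] : List (String × Int)) by
            simp]
      rw [insertBy_split _ x _ _
        (by intro y hy
            rcases List.mem_append.1 hy with hy' | hy'
            · rcases List.mem_append.1 hy' with hy'' | hy''
              · simp [hmem 1 y hy'', hx]
              · simp [hmem 2 y hy'', hx]
            · simp [hmem 3 y hy', hx])
        (by intro z hz; cases hz)]
      simp [List.filter_append, hx, List.append_assoc]

lemma map_slice_to {α β : Type} (f : α → β) (xs : List α) (b : Option Int) :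
    (PySem.List.slice xs none b).map f = PySem.List.slice (xs.map f) none b := by
  cases b <;> simp [PySem.List.slice, List.map_take]

-- one tier scan with early exit = append the tier's filter, truncated to the space left
lemma pbScanTier_eq (t head tail : String) (twords : PySem.Set String) (m p : Int) (hm : 0 ≤ m) (keys : List String) :
    ∀ results : List String, results.length ≤ m.toNat →
    pbScanTier t head tail twords m p keys results
      = results ++ (keys.filter (fun s => pbPriorityOpt t head tail twords s == some p)).take (m.toNat - results.length) := by
  induction keys with
  | nil => intro results _; simp [pbScanTier]
  | cons s ks ih =>
    intro results hlen
    by_cases hfull : results.length = m.toNat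
    · have hc : (results.length : Int) = m := by omega
      simp only [pbScanTier, if_pos hc]
      simp [hfull]
    · have hne : ¬ ((results.length : Int) = m) := by omega
      by_cases hp : pbPriorityOpt t head tail twords s == some p
      · rw [pbScanTier, if_neg hne, if_pos hp, ih (results ++ [s]) (by simp; omega)]
        have : m.toNat - results.length = (m.toNat - (results ++ [s]).length) + 1 := by
          simp; omega
        simp [hp, this, List.take_succ_cons, List.append_assoc]
      · rw [pbScanTier, if_neg hne, if_neg hp, ih results hlen]
        simp [hp]

lemma take_append_chunks {α : Type} (k : Nat) (a b : List α) :
    a.take k ++ b.take (k - (a.take k).length) = (a ++ b).take k := by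
  rw [List.take_append]
  congr 1
  simp
  omega

-- ===== VERDICT (by name: the statement is the Claim_ definition above) =====
theorem find_closest_page_py_spec : Claim_equal_find_closest_page_py := by
  intro target all_pages max_results _ hpre
  unfold Spec_find_closest_page_py
  unfold Pre_find_closest_page_py at hpre
  dsimp only [find_closest_page_py, find_closest_page_py_alt]
  rw [foldA_eq_filterMap, List.nil_append]
  rw [sorted_buckets _ (mem_filterMap_prio _ (fun s => pbPriority_cases _ s) _)]
  rw [map_slice_to]
  simp only [List.map_append]
  rw [bucket_eq _ 1 (by norm_num), bucket_eq _ 2 (by norm_num), bucket_eq _ 3 (by norm_num)]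
  rw [PySem.List.slice_to]
  simp only [List.foldl_cons, List.foldl_nil]
  rw [pbScanTier_eq _ _ _ _ _ 1 hpre _ [] (by simp)]
  rw [pbScanTier_eq _ _ _ _ _ 2 hpre _ _ (by simp)]
  rw [pbScanTier_eq _ _ _ _ _ 3 hpre _ _ (by simp; omega)]
  simp only [List.nil_append, List.length_nil, Nat.sub_zero,
    pbPriorityOpt_eq _ _ 1 (by norm_num), pbPriorityOpt_eq _ _ 2 (by norm_num),
    pbPriorityOpt_eq _ _ 3 (by norm_num)]
  rw [take_append_chunks, take_append_chunks, List.append_assoc]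
  exact hpre
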